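-- pv_equiv track=rewrite | github.com/weinbusch/advent-of-code | 2022/day15.py | nonoverlapping_ranges_for_line
-- ===== SOURCE A (Python) =====
-- from collections import deque
--
-- def nonoverlapping_ranges_for_line(sensors, line):
--   ranges = []
--   for x, y, r in sensors:
--     dy = abs(line - y)
--     dx = r - dy
--     if dx < 0:
--       continue
--     s = x - dx, x + dx + 1
--     ranges.append(s)
--   return merge_list_of_ranges(ranges)
--
-- def ranges_overlap(x, y):
--   xl, xh = x
--   yl, yh = y
--   return (xh >= yl and xl <= yh)
--
-- def merge_pair_of_ranges(x, y):
--   xl, xh = x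
--   yl, yh = y
--   return min(xl, yl), max(xh, yh)
--
-- def merge_list_of_ranges(ranges):
--   r = deque(sorted(ranges))
--   m = []
--   while r:
--     x = r.popleft()
--     if not m or not ranges_overlap(m[-1], x):
--       m.append(x)
--     else:
--       m[-1] = merge_pair_of_ranges(m[-1], x)
--   return m
-- ===== SOURCE B (Python) =====
-- def _insert(m, l, h):
--     # insert [l, h) into the disjoint, sorted, non-touching interval list m
--     if not m:
--         return [(l, h)]
--     al, ah = m[0]
--     if h < al:
--         return [(l, h)] + m
--     if ah < l:
--         return [(al, ah)] + _insert(m[1:], l, h)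
--     return _insert(m[1:], min(l, al), max(h, ah))
--
-- def nonoverlapping_ranges_for_line(sensors, line):
--     merged = []
--     for x, y, r in sensors:
--         d = r - abs(line - y)
--         if d >= 0:
--             merged = _insert(merged, x - d, x + d + 1)
--     return merged
-- ===== Notes on version B (the rewrite author's own statement) =====
-- stated objective: alternative
-- what changed: B never sorts: instead of A's build-all-intervals, sort, then deque-based pairwise merge, B folds over the sensors once and inserts each chord interval into a maintained disjoint normalized interval list via a recursive insertion with cascading coalescing; the result is the unique gap-separated decomposition of the covered set, hence equal to A's.
import Mathlib
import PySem

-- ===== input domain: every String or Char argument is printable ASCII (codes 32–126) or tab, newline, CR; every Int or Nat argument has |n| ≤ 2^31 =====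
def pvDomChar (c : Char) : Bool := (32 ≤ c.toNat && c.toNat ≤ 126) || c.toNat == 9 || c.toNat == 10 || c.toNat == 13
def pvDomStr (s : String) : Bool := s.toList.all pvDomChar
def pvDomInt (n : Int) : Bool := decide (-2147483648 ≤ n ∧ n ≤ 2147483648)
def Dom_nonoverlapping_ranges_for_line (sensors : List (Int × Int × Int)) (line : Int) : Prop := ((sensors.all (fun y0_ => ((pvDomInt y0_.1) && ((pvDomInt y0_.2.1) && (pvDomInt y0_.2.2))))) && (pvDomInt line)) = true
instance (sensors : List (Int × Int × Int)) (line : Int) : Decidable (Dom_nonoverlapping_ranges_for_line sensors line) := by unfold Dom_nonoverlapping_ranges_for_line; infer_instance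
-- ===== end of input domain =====

-- B replaces A's build-sort-merge pipeline by a sortless single fold over the sensors that
-- inserts each chord interval into a maintained disjoint normalized interval list
-- (cascading coalescing); proved equal via uniqueness of the gap-separated decomposition.


-- ===== PORT A =====
def ranges_overlap (x y : Int × Int) : Bool :=
  decide (y.1 ≤ x.2) && decide (x.1 ≤ y.2)

def merge_pair_of_ranges (x y : Int × Int) : Int × Int :=
  (min x.1 y.1, max x.2 y.2)

-- the while/popleft loop over the sorted deque, appending or replacing m[-1]
def merge_list_of_ranges (ranges : List (Int × Int)) : List (Int × Int) :=
  (PySem.List.sorted2 ranges (·.1) (·.2)).foldl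
    (fun m x =>
      match m.getLast? with
      | none => m ++ [x]
      | some t =>
        if ranges_overlap t x then m.dropLast ++ [merge_pair_of_ranges t x]
        else m ++ [x])
    []

def nonoverlapping_ranges_for_line (sensors : List (Int × Int × Int)) (line : Int) : List (Int × Int) :=
  let ranges := sensors.foldl
    (fun acc s =>
      let dy := |line - s.2.1|
      let dx := s.2.2 - dy
      if dx < 0 then acc else acc ++ [(s.1 - dx, s.1 + dx + 1)])
    []
  merge_list_of_ranges ranges

-- ===== PORT B =====
-- _insert: insert [l, h) into the disjoint, sorted, non-touching interval list m
def insertIv : List (Int × Int) → Int → Int → List (Int × Int)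
  | [], l, h => [(l, h)]
  | (al, ah) :: m, l, h =>
    if h < al then (l, h) :: (al, ah) :: m
    else if ah < l then (al, ah) :: insertIv m l h
    else insertIv m (min l al) (max h ah)

def nonoverlapping_ranges_for_line_alt (sensors : List (Int × Int × Int)) (line : Int) : List (Int × Int) :=
  sensors.foldl
    (fun merged s =>
      let d := s.2.2 - |line - s.2.1|
      if 0 ≤ d then insertIv merged (s.1 - d) (s.1 + d + 1) else merged)
    []

-- ===== PRECONDITION & SPEC =====
def Spec_nonoverlapping_ranges_for_line (sensors : List (Int × Int × Int)) (line : Int) (out : List (Int × Int)) : Prop := out = nonoverlapping_ranges_for_line_alt sensors line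
instance (sensors : List (Int × Int × Int)) (line : Int) (out : List (Int × Int)) : Decidable (Spec_nonoverlapping_ranges_for_line sensors line out) := by unfold Spec_nonoverlapping_ranges_for_line; infer_instance

-- ===== CLAIM (what is proved, stated in full; the proofs are below) =====
def Claim_equal_nonoverlapping_ranges_for_line : Prop := ∀ (sensors : List (Int × Int × Int)) (line : Int), Dom_nonoverlapping_ranges_for_line sensors line → Spec_nonoverlapping_ranges_for_line sensors line (nonoverlapping_ranges_for_line sensors line)

-- ===== LEMMAS AND PROOFS =====

-- the set of integers covered by a list of half-open intervals
def iCov (m : List (Int × Int)) (z : Int) : Prop := ∃ p ∈ m, p.1 ≤ z ∧ z < p.2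

theorem iCov_cons (l h : Int) (m : List (Int × Int)) (z : Int) :
    iCov ((l, h) :: m) z ↔ (l ≤ z ∧ z < h) ∨ iCov m z := by simp [iCov]

theorem iCov_cons' (p : Int × Int) (m : List (Int × Int)) (z : Int) :
    iCov (p :: m) z ↔ (p.1 ≤ z ∧ z < p.2) ∨ iCov m z := by simp [iCov]

theorem iCov_single (p : Int × Int) (z : Int) :
    iCov [p] z ↔ p.1 ≤ z ∧ z < p.2 := by simp [iCov]

theorem iCov_append (a b : List (Int × Int)) (z : Int) :
    iCov (a ++ b) z ↔ iCov a z ∨ iCov b z := by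
  simp [iCov, or_and_right, exists_or]

theorem iCov_perm {m1 m2 : List (Int × Int)} (h : m1.Perm m2) (z : Int) :
    iCov m1 z ↔ iCov m2 z := by
  unfold iCov
  constructor <;> rintro ⟨p, hp, hz⟩
  · exact ⟨p, h.mem_iff.mp hp, hz⟩
  · exact ⟨p, h.mem_iff.mpr hp, hz⟩

-- every covered point of the tail lies strictly above the head's end
theorem tail_above (l h : Int) (m : List (Int × Int))
    (hn : (∀ p ∈ (l, h) :: m, p.1 < p.2) ∧ ((l, h) :: m).Pairwise (fun p q => p.2 < q.1))
    (z : Int) (hz : iCov m z) : h < z := by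
  obtain ⟨p, hp, hz1, hz2⟩ := hz
  have h1 := (List.pairwise_cons.mp hn.2).1 p hp
  have h2 := hn.1 p (by simp [hp])
  omega

-- a normalized (disjoint, gap-separated, sorted) list is determined by its covered set
theorem normal_uniq : ∀ (m1 m2 : List (Int × Int)),
    (∀ p ∈ m1, p.1 < p.2) ∧ m1.Pairwise (fun p q => p.2 < q.1) →
    (∀ p ∈ m2, p.1 < p.2) ∧ m2.Pairwise (fun p q => p.2 < q.1) →
    (∀ z, iCov m1 z ↔ iCov m2 z) → m1 = m2 := by
  intro m1
  induction m1 with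
  | nil =>
    intro m2 _ hn2 hc
    cases m2 with
    | nil => rfl
    | cons p t =>
      exfalso
      have hp : iCov (p :: t) p.1 := ⟨p, by simp, le_refl _, hn2.1 p (by simp)⟩
      exact (by simp [iCov] : ¬ iCov [] p.1) ((hc p.1).mpr hp)
  | cons a t1 ih =>
    intro m2 hn1 hn2 hc
    obtain ⟨l, h⟩ := a
    cases m2 with
    | nil =>
      exfalso
      have : iCov ((l, h) :: t1) l := ⟨(l, h), by simp, le_refl _, hn1.1 (l, h) (by simp)⟩
      exact (by simp [iCov] : ¬ iCov [] l) ((hc l).mp this)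
    | cons b t2 =>
      obtain ⟨l2, h2⟩ := b
      have hlh : l < h := hn1.1 (l, h) (by simp)
      have hlh2 : l2 < h2 := hn2.1 (l2, h2) (by simp)
      have hmin1 : ∀ z, iCov ((l, h) :: t1) z → l ≤ z := by
        intro z hz
        rcases (iCov_cons l h t1 z).mp hz with ⟨h1, _⟩ | hz'
        · exact h1
        · have := tail_above l h t1 hn1 z hz'; omega
      have hmin2 : ∀ z, iCov ((l2, h2) :: t2) z → l2 ≤ z := by
        intro z hz
        rcases (iCov_cons l2 h2 t2 z).mp hz with ⟨h1, _⟩ | hz'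
        · exact h1
        · have := tail_above l2 h2 t2 hn2 z hz'; omega
      have hcl : iCov ((l, h) :: t1) l := (iCov_cons l h t1 l).mpr (Or.inl ⟨le_refl _, hlh⟩)
      have hcl2 : iCov ((l2, h2) :: t2) l2 := (iCov_cons l2 h2 t2 l2).mpr (Or.inl ⟨le_refl _, hlh2⟩)
      have hll : l = l2 := le_antisymm (hmin1 l2 ((hc l2).mpr hcl2)) (hmin2 l ((hc l).mp hcl))
      have hnc1 : ¬ iCov ((l, h) :: t1) h := by
        intro hz
        rcases (iCov_cons l h t1 h).mp hz with ⟨_, h2'⟩ | hz'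
        · omega
        · have := tail_above l h t1 hn1 h hz'; omega
      have hnc2 : ¬ iCov ((l2, h2) :: t2) h2 := by
        intro hz
        rcases (iCov_cons l2 h2 t2 h2).mp hz with ⟨_, h2'⟩ | hz'
        · omega
        · have := tail_above l2 h2 t2 hn2 h2 hz'; omega
      have hhh : h = h2 := by
        rcases lt_trichotomy h h2 with hlt | heq | hgt
        · exact absurd ((hc h).mpr ((iCov_cons l2 h2 t2 h).mpr (Or.inl ⟨by omega, hlt⟩))) hnc1
        · exact heq
        · exact absurd ((hc h2).mp ((iCov_cons l h t1 h2).mpr (Or.inl ⟨by omega, hgt⟩))) hnc2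
      subst hll; subst hhh
      have hct : ∀ z, iCov t1 z ↔ iCov t2 z := by
        intro z
        constructor
        · intro hz
          have hza := tail_above l h t1 hn1 z hz
          rcases (iCov_cons l h t2 z).mp ((hc z).mp ((iCov_cons l h t1 z).mpr (Or.inr hz))) with ⟨_, _⟩ | h'
          · omega
          · exact h'
        · intro hz
          have hza := tail_above l h t2 hn2 z hz
          rcases (iCov_cons l h t1 z).mp ((hc z).mpr ((iCov_cons l h t2 z).mpr (Or.inr hz))) with ⟨_, _⟩ | h'
          · omega
          · exact h'
      have : t1 = t2 := ih t2 ⟨fun p hp => hn1.1 p (by simp [hp]), hn1.2.of_cons⟩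
        ⟨fun p hp => hn2.1 p (by simp [hp]), hn2.2.of_cons⟩ hct
      rw [this]

-- ===== B-side lemmas: insertIv adds exactly [l, h) and preserves normality =====

theorem insertIv_cov (m : List (Int × Int)) (l h z : Int) :
    iCov (insertIv m l h) z ↔ iCov m z ∨ (l ≤ z ∧ z < h) := by
  induction m generalizing l h with
  | nil => simp [insertIv, iCov]
  | cons a m ih =>
    obtain ⟨al, ah⟩ := a
    simp only [insertIv]
    split_ifs with h1 h2
    · simp only [iCov_cons]; tauto
    · simp only [iCov_cons, ih]; tauto
    · rw [ih, iCov_cons]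
      by_cases hP : iCov m z <;> simp [hP] <;> omega

theorem insertIv_lb (m : List (Int × Int)) (l h c : Int)
    (hm : ∀ p ∈ m, c < p.1) (hl : c < l) : ∀ q ∈ insertIv m l h, c < q.1 := by
  induction m generalizing l h with
  | nil => simpa [insertIv]
  | cons a m ih =>
    obtain ⟨al, ah⟩ := a
    simp only [insertIv]
    have hal : c < al := hm (al, ah) (by simp)
    have hm' : ∀ p ∈ m, c < p.1 := fun p hp => hm p (by simp [hp])
    split_ifs with h1 h2
    · intro q hq
      rcases List.mem_cons.mp hq with rfl | hq
      · exact hl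
      · exact hm q hq
    · intro q hq
      rcases List.mem_cons.mp hq with rfl | hq
      · exact hal
      · exact ih l h hm' hl q hq
    · exact ih _ _ hm' (by omega)

theorem insertIv_normal (m : List (Int × Int)) (l h : Int)
    (hm : (∀ p ∈ m, p.1 < p.2) ∧ m.Pairwise (fun p q => p.2 < q.1)) (hlh : l < h) :
    (∀ p ∈ insertIv m l h, p.1 < p.2) ∧ (insertIv m l h).Pairwise (fun p q => p.2 < q.1) := by
  induction m generalizing l h with
  | nil => simp [insertIv, hlh]
  | cons a m ih =>
    obtain ⟨al, ah⟩ := a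
    obtain ⟨hb, hpw⟩ := hm
    have hb' : ∀ p ∈ m, p.1 < p.2 := fun p hp => hb p (by simp [hp])
    have hpw' : m.Pairwise (fun p q => p.2 < q.1) := hpw.of_cons
    have hhead : ∀ p ∈ m, ah < p.1 := by
      intro p hp; exact (List.pairwise_cons.mp hpw).1 p hp
    have hal : al < ah := hb (al, ah) (by simp)
    simp only [insertIv]
    split_ifs with h1 h2
    · constructor
      · intro p hp
        rcases List.mem_cons.mp hp with rfl | hp
        · exact hlh
        · exact hb p hp
      · refine List.pairwise_cons.mpr ⟨?_, hpw⟩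
        intro q hq
        rcases List.mem_cons.mp hq with rfl | hq
        · exact h1
        · have := hhead q hq; omega
    · obtain ⟨ihb, ihpw⟩ := ih l h ⟨hb', hpw'⟩ hlh
      constructor
      · intro p hp
        rcases List.mem_cons.mp hp with rfl | hp
        · exact hal
        · exact ihb p hp
      · exact List.pairwise_cons.mpr ⟨insertIv_lb m l h ah hhead (by omega), ihpw⟩
    · exact ih _ _ ⟨hb', hpw'⟩ (by omega)

-- B's fold keeps the list normalized and covering exactly the processed chords
theorem alt_fold (line : Int) (sensors : List (Int × Int × Int)) :
    ∀ (acc : List (Int × Int)),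
    (∀ p ∈ acc, p.1 < p.2) → acc.Pairwise (fun p q => p.2 < q.1) →
    (let r := sensors.foldl
        (fun merged s =>
          let d := s.2.2 - |line - s.2.1|
          if 0 ≤ d then insertIv merged (s.1 - d) (s.1 + d + 1) else merged) acc
     ((∀ p ∈ r, p.1 < p.2) ∧ r.Pairwise (fun p q => p.2 < q.1)) ∧
     (∀ z, iCov r z ↔ iCov acc z ∨
        iCov (sensors.filterMap (fun s =>
          if 0 ≤ s.2.2 - |line - s.2.1| then some (s.1 - (s.2.2 - |line - s.2.1|), s.1 + (s.2.2 - |line - s.2.1|) + 1) else none)) z)) := by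
  induction sensors with
  | nil => intro acc h1 h2; exact ⟨⟨h1, h2⟩, by simp [iCov]⟩
  | cons s t ih =>
    intro acc h1 h2
    simp only [List.foldl_cons, List.filterMap_cons]
    by_cases hd : 0 ≤ s.2.2 - |line - s.2.1|
    · rw [if_pos hd]
      have hn := insertIv_normal acc (s.1 - (s.2.2 - |line - s.2.1|))
        (s.1 + (s.2.2 - |line - s.2.1|) + 1) ⟨h1, h2⟩ (by omega)
      obtain ⟨⟨r1, r2⟩, r3⟩ := ih _ hn.1 hn.2
      refine ⟨⟨r1, r2⟩, ?_⟩
      intro z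
      rw [r3 z, insertIv_cov]
      simp only [if_pos hd, iCov_cons]
      tauto
    · rw [if_neg hd]
      obtain ⟨⟨r1, r2⟩, r3⟩ := ih acc h1 h2
      refine ⟨⟨r1, r2⟩, ?_⟩
      intro z
      rw [r3 z]
      simp only [if_neg hd]
-- A-side: the two interval-building passes agree
theorem build_ranges_eq (sensors : List (Int × Int × Int)) (line : Int) (acc : List (Int × Int)) :
    sensors.foldl
      (fun acc s =>
        let dy := |line - s.2.1|
        let dx := s.2.2 - dy
        if dx < 0 then acc else acc ++ [(s.1 - dx, s.1 + dx + 1)]) acc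
    = acc ++ sensors.filterMap (fun s =>
        if 0 ≤ s.2.2 - |line - s.2.1| then some (s.1 - (s.2.2 - |line - s.2.1|), s.1 + (s.2.2 - |line - s.2.1|) + 1) else none) := by
  induction sensors generalizing acc with
  | nil => simp
  | cons s t ih =>
    simp only [List.foldl_cons, List.filterMap_cons]
    by_cases h : s.2.2 - |line - s.2.1| < 0
    · rw [if_pos h, if_neg (by omega)]
      exact ih acc
    · rw [if_neg h, if_pos (by omega)]
      rw [ih]
      simp

-- A's getLast?/dropLast fold in running-interval form
theorem merge_loops_eq (xs : List (Int × Int)) (out : List (Int × Int)) (cur : Int × Int) :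
    xs.foldl
      (fun m x =>
        match m.getLast? with
        | none => m ++ [x]
        | some t =>
          if ranges_overlap t x then m.dropLast ++ [merge_pair_of_ranges t x]
          else m ++ [x]) (out ++ [cur])
    = (xs.foldl
        (fun (p : (Int × Int) × List (Int × Int)) iv =>
          if iv.1 ≤ p.1.2 ∧ p.1.1 ≤ iv.2 then ((min p.1.1 iv.1, max p.1.2 iv.2), p.2)
          else ((iv.1, iv.2), p.2 ++ [p.1])) (cur, out)).2
      ++ [(xs.foldl
        (fun (p : (Int × Int) × List (Int × Int)) iv =>
          if iv.1 ≤ p.1.2 ∧ p.1.1 ≤ iv.2 then ((min p.1.1 iv.1, max p.1.2 iv.2), p.2)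
          else ((iv.1, iv.2), p.2 ++ [p.1])) (cur, out)).1] := by
  induction xs generalizing out cur with
  | nil => simp
  | cons x t ih =>
    simp only [List.foldl_cons, List.getLast?_concat, List.dropLast_concat]
    by_cases h : x.1 ≤ cur.2 ∧ cur.1 ≤ x.2
    · rw [if_pos h]
      have hb : ranges_overlap cur x = true := by
        simp [ranges_overlap]; omega
      rw [hb]
      simp only [if_true]
      exact ih out (merge_pair_of_ranges cur x)
    · rw [if_neg h]
      have hb : ranges_overlap cur x = false := by
        simp only [ranges_overlap, Bool.and_eq_false_iff, decide_eq_false_iff_not]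
        omega
      rw [hb]
      simp only [Bool.false_eq_true, if_false]
      simpa using ih (out ++ [cur]) x

-- A's running merge over a key-sorted list is normalized and covers its input
theorem run_spec (xs : List (Int × Int)) :
    ∀ (cur : Int × Int) (out : List (Int × Int)),
    (∀ p ∈ xs, p.1 < p.2) →
    (∀ p ∈ xs, cur.1 ≤ p.1) →
    xs.Pairwise (fun p q => p.1 ≤ q.1) →
    (∀ p ∈ out, p.1 < p.2) → out.Pairwise (fun p q => p.2 < q.1) →
    (∀ p ∈ out, p.2 < cur.1) → cur.1 < cur.2 →
    (let r := xs.foldl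
        (fun (p : (Int × Int) × List (Int × Int)) iv =>
          if iv.1 ≤ p.1.2 ∧ p.1.1 ≤ iv.2 then ((min p.1.1 iv.1, max p.1.2 iv.2), p.2)
          else ((iv.1, iv.2), p.2 ++ [p.1])) (cur, out)
     let fin := r.2 ++ [r.1]
     ((∀ p ∈ fin, p.1 < p.2) ∧ fin.Pairwise (fun p q => p.2 < q.1)) ∧
     (∀ z, iCov fin z ↔ (iCov out z ∨ (cur.1 ≤ z ∧ z < cur.2)) ∨ iCov xs z)) := by
  induction xs with
  | nil =>
    intro cur out _ _ _ hob hop hoc hcc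
    constructor
    · constructor
      · intro p hp
        rcases List.mem_append.mp hp with hp | hp
        · exact hob p hp
        · simp at hp; subst hp; exact hcc
      · rw [List.pairwise_append]
        exact ⟨hop, by simp, by intro p hp q hq; simp at hq; subst hq; exact hoc p hp⟩
    · intro z
      rw [iCov_append]
      simp [iCov]
  | cons x t ih =>
    intro cur out hxb hxl hxp hob hop hoc hcc
    have hxb' : ∀ p ∈ t, p.1 < p.2 := fun p hp => hxb p (by simp [hp])
    have hxx : x.1 < x.2 := hxb x (by simp)
    have hcx : cur.1 ≤ x.1 := hxl x (by simp)
    have hxt : ∀ p ∈ t, x.1 ≤ p.1 := (List.pairwise_cons.mp hxp).1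
    simp only [List.foldl_cons]
    by_cases hov : x.1 ≤ cur.2 ∧ cur.1 ≤ x.2
    · rw [if_pos hov]
      have h1 := ih (min cur.1 x.1, max cur.2 x.2) out hxb'
        (by intro p hp; have h1 := hxl p (by simp [hp]); have h2 := hxt p hp; simp only []; omega)
        hxp.of_cons hob hop
        (by intro p hp; have := hoc p hp; simp only []; omega)
        (by simp only []; omega)
      obtain ⟨hn, hcov⟩ := h1
      refine ⟨hn, ?_⟩
      intro z
      rw [hcov z, iCov_cons' x]
      simp only []
      by_cases h1 : iCov out z <;> by_cases h2 : iCov t z <;> simp only [h1, h2] <;> simp <;> omega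
    · rw [if_neg hov]
      have hgap : cur.2 < x.1 := by
        rcases not_and_or.mp hov with h | h <;> omega
      have h1 := ih (x.1, x.2) (out ++ [cur]) hxb' (by simpa using hxt) hxp.of_cons
        (by intro p hp; rcases List.mem_append.mp hp with hp | hp
            · exact hob p hp
            · simp at hp; subst hp; exact hcc)
        (by rw [List.pairwise_append]
            exact ⟨hop, by simp, by intro p hp q hq; simp at hq; subst hq; exact hoc p hp⟩)
        (by intro p hp; rcases List.mem_append.mp hp with hp | hp
            · have := hoc p hp; simp only []; omega
            · simp at hp; subst hp; simpa using hgap)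
        (by simpa using hxx)
      obtain ⟨hn, hcov⟩ := h1
      refine ⟨hn, ?_⟩
      intro z
      rw [hcov z, iCov_append, iCov_single, iCov_cons' x]
      simp only []
      tauto

-- the lexicographic Python sort is nondecreasing in the first component
theorem insertBy_pw (bef : Int × Int → Int × Int → Bool)
    (hb : ∀ a b, bef a b = true → a.1 ≤ b.1)
    (hnb : ∀ a b, bef a b = false → b.1 ≤ a.1)
    (x : Int × Int) (ys : List (Int × Int))
    (hp : ys.Pairwise (fun p q => p.1 ≤ q.1)) :
    (PySem.List.insertBy bef x ys).Pairwise (fun p q => p.1 ≤ q.1) := by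
  induction ys with
  | nil => simp [PySem.List.insertBy]
  | cons y ys ih =>
    simp only [PySem.List.insertBy]
    by_cases hxy : bef x y = true
    · simp only [hxy, if_true]
      refine List.pairwise_cons.mpr ⟨?_, hp⟩
      intro q hq
      rcases List.mem_cons.mp hq with rfl | hq
      · exact hb x q hxy
      · exact le_trans (hb x y hxy) ((List.pairwise_cons.mp hp).1 q hq)
    · simp only [hxy]
      refine List.pairwise_cons.mpr ⟨?_, ih hp.of_cons⟩
      intro q hq
      rcases (PySem.List.mem_insertBy bef x q ys).mp hq with h' | hq
      · subst h'; exact hnb q y (by simpa using hxy)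
      · exact (List.pairwise_cons.mp hp).1 q hq

theorem foldl_insertBy_pw (xs : List (Int × Int)) : ∀ (acc : List (Int × Int)),
    acc.Pairwise (fun p q => p.1 ≤ q.1) →
    (xs.foldl (fun acc x => PySem.List.insertBy
      (fun a b : Int × Int => decide (a.1 < b.1) || (!decide (b.1 < a.1) && decide (a.2 < b.2))) x acc) acc).Pairwise
      (fun p q => p.1 ≤ q.1) := by
  induction xs with
  | nil => intro acc h; simpa
  | cons x t ih =>
    intro acc h
    simp only [List.foldl_cons]
    refine ih (PySem.List.insertBy _ x acc) (insertBy_pw _ ?_ ?_ x acc h)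
    · intro a b hab
      simp only [Bool.or_eq_true, Bool.and_eq_true, Bool.not_eq_eq_eq_not, decide_eq_true_eq] at hab
      rcases hab with h1 | ⟨h1, _⟩
      · omega
      · simp at h1; omega
    · intro a b hab
      simp only [Bool.or_eq_false_iff, Bool.and_eq_false_iff] at hab
      have := hab.1
      simp at this; omega

theorem sorted2_pw (xs : List (Int × Int)) :
    (PySem.List.sorted2 xs (·.1) (·.2)).Pairwise (fun p q => p.1 ≤ q.1) := by
  have e : PySem.List.sorted2 xs (·.1) (·.2) =
      xs.foldl (fun acc x => PySem.List.insertBy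
        (fun a b : Int × Int => decide (a.1 < b.1) || (!decide (b.1 < a.1) && decide (a.2 < b.2))) x acc) [] := rfl
  rw [e]
  exact foldl_insertBy_pw xs [] (by simp)

-- every built chord interval is nonempty
theorem ranges_bounds (sensors : List (Int × Int × Int)) (line : Int) :
    ∀ p ∈ sensors.filterMap (fun s =>
        if 0 ≤ s.2.2 - |line - s.2.1| then some (s.1 - (s.2.2 - |line - s.2.1|), s.1 + (s.2.2 - |line - s.2.1|) + 1) else none), p.1 < p.2 := by
  intro p hp
  simp only [List.mem_filterMap] at hp
  obtain ⟨s, _, hs⟩ := hp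
  by_cases hd : 0 ≤ s.2.2 - |line - s.2.1|
  · rw [if_pos hd] at hs
    cases hs
    simp only []
    omega
  · rw [if_neg hd] at hs
    cases hs

-- ===== VERDICT (by name: the statement is the Claim_ definition above) =====
theorem nonoverlapping_ranges_for_line_spec : Claim_equal_nonoverlapping_ranges_for_line := by
  intro sensors line _
  show _ = _
  unfold nonoverlapping_ranges_for_line nonoverlapping_ranges_for_line_alt merge_list_of_ranges
  simp only []
  rw [build_ranges_eq sensors line []]
  simp only [List.nil_append]
  set ranges := sensors.filterMap (fun s =>
      if 0 ≤ s.2.2 - |line - s.2.1| then some (s.1 - (s.2.2 - |line - s.2.1|), s.1 + (s.2.2 - |line - s.2.1|) + 1) else none) with hranges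
  have hperm := PySem.List.sorted2_perm ranges (·.1) (·.2) false
  have hpw := sorted2_pw ranges
  have hbnd : ∀ p ∈ PySem.List.sorted2 ranges (·.1) (·.2), p.1 < p.2 := by
    intro p hp
    exact ranges_bounds sensors line p (hperm.mem_iff.mp hp)
  obtain ⟨⟨hB1, hB2⟩, hBcov⟩ := alt_fold line sensors [] (by simp) (by simp)
  rw [← hranges] at hBcov
  cases hs : PySem.List.sorted2 ranges (·.1) (·.2) with
  | nil =>
    have hre : ranges = [] := by
      have h := hperm
      rw [hs] at h
      exact h.symm.eq_nil
    simp only [List.foldl_nil]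
    refine (normal_uniq _ _ ⟨hB1, hB2⟩ ⟨by simp, by simp⟩ ?_).symm
    intro z
    rw [hBcov z, hre]
    simp [iCov]
  | cons c rest =>
    rw [hs] at hbnd hpw hperm
    simp only [List.foldl_cons, List.getLast?_nil, List.nil_append]
    rw [show ([c] : List (Int × Int)) = [] ++ [c] from rfl, merge_loops_eq rest [] c]
    obtain ⟨⟨hA1, hA2⟩, hAcov⟩ := run_spec rest c [] (fun p hp => hbnd p (by simp [hp]))
      (List.pairwise_cons.mp hpw).1 hpw.of_cons (by simp) (by simp) (by simp)
      (hbnd c (by simp))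
    refine normal_uniq _ _ ⟨hA1, hA2⟩ ⟨hB1, hB2⟩ ?_
    intro z
    rw [hAcov z, hBcov z]
    have hcr : iCov ranges z ↔ iCov (c :: rest) z := iCov_perm hperm.symm z
    rw [iCov_cons' c] at hcr
    simp only [iCov, List.not_mem_nil, false_and, exists_false, false_or] at *
    exact hcr.symm
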